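-- pv_equiv track=rewrite | github.com/smriti-joshi/dicom2dce | dce_filter.py | filter_step4_series_description
-- ===== SOURCE A (Python) =====
-- class FilterConfig:
--     """Configuration for DCE filtering"""
--     MAX_TR = 15
--     MAX_TE = 15
--     IMAGE_TYPE_EXCLUSIONS = ["DERIVED", "SECONDARY", "SCREEN SAVE", "LOCALIZER", "SCOUT", "PROJECTION IMAGE", "MONTAGE", "MPR", "SUBTRACT"]
--     SERIES_DESC_EXCLUSIONS = ["t2", "adc", "dwi", "sdyn", "loc", "sub", "survey", "rec",
--                               "sustraccion", "test", "wi", "wo", "pei",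
--                               "scout", "pos", "ref", "cal", "shimming",
--                               "mip", "mpr", "map", "normalized", "nd"]
--     SIMILARITY_THRESHOLD = 0.8
--     CONTRAST_AGENT_TAGS = ["ContrastBolusAgent", "ContrastBolusStartTime", "ContrastBolusVolume"]
--     # Dynamic/temporal sequence markers - if any series has these, filter out the rest
--     DYNAMIC_MARKERS = ["dyn", "din", "lava", "thrive", "vibe"]
--     # When multiple image sizes exist, keep the one with most files
--     KEEP_LARGEST_SIZE_GROUP = True
--
-- def filter_step4_series_description(metadata_list):
--     """Step 4: Remove based on SeriesDescription"""
--     filtered = []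
--     for entry in metadata_list:
--         desc = str(entry.get("SeriesDescription", "")).lower()
--
--         # Check if any exclusion substring is in description
--         if any(substr in desc for substr in FilterConfig.SERIES_DESC_EXCLUSIONS):
--             continue
--
--         filtered.append(entry)
--
--     return filtered
-- ===== SOURCE B (Python) =====
-- # B: index the exclusion patterns in a hash set once, and test each description by
-- # sliding windows of the (few) distinct pattern lengths over it, looking each window
-- # up in the set -- no per-pattern substring search at all.
-- _PATTERNS = ["t2", "adc", "dwi", "sdyn", "loc", "sub", "survey", "rec",
--              "sustraccion", "test", "wi", "wo", "pei",
--              "scout", "pos", "ref", "cal", "shimming",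
--              "mip", "mpr", "map", "normalized", "nd"]
-- _PAT_SET = frozenset(_PATTERNS)
-- _WINDOW_LENS = sorted({len(p) for p in _PATTERNS})
--
-- def _excluded(desc):
--     return any(desc[i:i + n] in _PAT_SET
--                for i in range(len(desc)) for n in _WINDOW_LENS)
--
-- def filter_step4_series_description(metadata_list):
--     return [entry for entry in metadata_list
--             if not _excluded(str(entry.get("SeriesDescription", "")).lower())]
-- ===== Notes on version B (the rewrite author's own statement) =====
-- stated objective: alternative
-- what changed: B replaces A's per-entry scan over all 23 patterns with 'substr in desc' by a precomputed hash set of the patterns plus their distinct lengths: each description is tested by sliding windows of those lengths and looking each window up in the set, so no substring search per pattern runs at all.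
import Mathlib
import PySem

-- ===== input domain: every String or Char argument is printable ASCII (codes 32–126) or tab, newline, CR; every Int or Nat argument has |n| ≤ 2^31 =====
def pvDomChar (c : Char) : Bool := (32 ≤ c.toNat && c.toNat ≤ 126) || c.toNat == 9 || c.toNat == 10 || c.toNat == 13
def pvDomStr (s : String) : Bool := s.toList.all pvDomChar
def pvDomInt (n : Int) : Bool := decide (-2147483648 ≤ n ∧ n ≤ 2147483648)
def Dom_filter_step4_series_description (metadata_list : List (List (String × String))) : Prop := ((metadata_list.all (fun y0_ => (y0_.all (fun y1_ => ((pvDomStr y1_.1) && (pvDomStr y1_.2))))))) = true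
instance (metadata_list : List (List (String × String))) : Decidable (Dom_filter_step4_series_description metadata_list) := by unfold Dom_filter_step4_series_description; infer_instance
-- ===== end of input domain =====

-- B indexes the exclusion patterns in a hash set and tests each description by sliding
-- windows of the distinct pattern lengths, looked up in the set — no per-pattern
-- substring search; an alternative of the same cost class, not claimed faster.

-- ===== PORT A =====
def pvSeriesDescExclusions : List String :=
  ["t2", "adc", "dwi", "sdyn", "loc", "sub", "survey", "rec",
   "sustraccion", "test", "wi", "wo", "pei",
   "scout", "pos", "ref", "cal", "shimming",
   "mip", "mpr", "map", "normalized", "nd"]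

def filter_step4_series_description (metadata_list : List (List (String × String))) : List (List (String × String)) :=
  metadata_list.foldl (fun filtered entry =>
    let desc := PySem.Str.lower (PySem.Dict.getD (PySem.Dict.mk entry) "SeriesDescription" "")
    if pvSeriesDescExclusions.any (fun substr => PySem.Str.isIn substr desc) then
      filtered
    else
      filtered ++ [entry]) []

-- ===== PORT B =====
def pvPatterns : List String :=
  ["t2", "adc", "dwi", "sdyn", "loc", "sub", "survey", "rec",
   "sustraccion", "test", "wi", "wo", "pei",
   "scout", "pos", "ref", "cal", "shimming",
   "mip", "mpr", "map", "normalized", "nd"]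

-- _PAT_SET = frozenset(_PATTERNS)
def pvPatSet : PySem.Set String := PySem.Set.ofList pvPatterns

-- _WINDOW_LENS = sorted({len(p) for p in _PATTERNS})
def pvWindowLens : List Int :=
  PySem.List.sorted (PySem.Set.ofList (pvPatterns.map (fun p => (PySem.Str.len p : Int)))) (fun x => x) false

-- desc[i:i+n] for 0 ≤ i, 0 ≤ n is exactly PySem.List.slice on the code points
def pvExcluded (desc : String) : Bool :=
  (List.range desc.toList.length).any (fun i =>
    pvWindowLens.any (fun n =>
      PySem.Set.contains pvPatSet
        (String.ofList (PySem.List.slice desc.toList (some (i : Int)) (some ((i : Int) + n))))))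

def filter_step4_series_description_alt (metadata_list : List (List (String × String))) : List (List (String × String)) :=
  metadata_list.filter (fun entry =>
    !pvExcluded (PySem.Str.lower (PySem.Dict.getD (PySem.Dict.mk entry) "SeriesDescription" "")))

-- ===== PRECONDITION & SPEC =====
def Spec_filter_step4_series_description (metadata_list : List (List (String × String))) (out : List (List (String × String))) : Prop := out = filter_step4_series_description_alt metadata_list
instance (metadata_list : List (List (String × String))) (out : List (List (String × String))) : Decidable (Spec_filter_step4_series_description metadata_list out) := by unfold Spec_filter_step4_series_description; infer_instance

-- ===== CLAIM =====
def Claim_equal_filter_step4_series_description : Prop := ∀ (metadata_list : List (List (String × String))), Dom_filter_step4_series_description metadata_list → Spec_filter_step4_series_description metadata_list (filter_step4_series_description metadata_list)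

-- ===== LEMMAS AND PROOFS =====

-- every exclusion pattern is nonempty
lemma pvPat_nonempty : ∀ p ∈ pvPatterns, p.toList ≠ [] := by decide

-- every pattern's length is one of the window lengths
lemma pvPat_len_mem : ∀ p ∈ pvPatterns, ((p.toList.length : Int)) ∈ pvWindowLens := by decide

-- every window length is nonnegative
lemma pvWindowLens_nonneg : ∀ n ∈ pvWindowLens, 0 ≤ n := by decide

-- for a nonempty pattern, an occurrence position can be bounded below the length
lemma pvExists_lt_length {sub cs : List Char} (hsub : sub ≠ []) :
    (∃ i < cs.length, sub <+: cs.drop i) ↔ ∃ j, sub <+: cs.drop j := by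
  constructor
  · rintro ⟨i, _, h⟩; exact ⟨i, h⟩
  · rintro ⟨j, h⟩
    by_cases hj : j < cs.length
    · exact ⟨j, hj, h⟩
    · have hnil : cs.drop j = [] := List.drop_eq_nil_of_le (by omega)
      rw [hnil] at h
      exact absurd (List.prefix_nil.mp h) hsub

-- A's per-pattern 'substr in desc' scan equals B's windowed set lookup
lemma pvScan_eq (d : String) :
    pvSeriesDescExclusions.any (fun substr => PySem.Str.isIn substr d) = pvExcluded d := by
  rw [Bool.eq_iff_iff]
  unfold pvExcluded
  simp only [List.any_eq_true, List.mem_range]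
  constructor
  · rintro ⟨p, hp, hin⟩
    have hex : ∃ j, p.toList <+: d.toList.drop j :=
      (PySem.Chars.exists_prefix_drop_iff_isIn _ _).mpr
        ((PySem.Chars.isIn_iff_infix _ _).mpr ((PySem.Str.isIn_iff_infix p d).mp hin))
    obtain ⟨i, hi, hpre⟩ := (pvExists_lt_length (pvPat_nonempty p hp)).mpr hex
    refine ⟨i, hi, (p.toList.length : Int), pvPat_len_mem p hp, ?_⟩
    have hslice : PySem.List.slice d.toList (some (i : Int)) (some ((i : Int) + (p.toList.length : Int)))
        = (d.toList.drop i).take p.toList.length :=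
      PySem.List.slice_natCast_add d.toList i p.toList.length
    rw [hslice, ← List.prefix_iff_eq_take.mp hpre]
    rw [show String.ofList p.toList = p from by simp]
    have : p ∈ pvPatSet := by
      simpa [pvPatSet, PySem.Set.mem_ofList] using hp
    simpa [PySem.Set.contains] using this
  · rintro ⟨i, hi, n, hn, hmem⟩
    have h0 : 0 ≤ n := pvWindowLens_nonneg n hn
    obtain ⟨m, rfl⟩ : ∃ m : Nat, n = (m : Int) := ⟨n.toNat, (Int.toNat_of_nonneg h0).symm⟩
    rw [PySem.List.slice_natCast_add] at hmem
    set w := String.ofList ((d.toList.drop i).take m) with hw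
    have hwmem : w ∈ pvPatterns := by
      have := hmem
      simp [PySem.Set.contains, pvPatSet, PySem.Set.mem_ofList] at this
      exact this
    refine ⟨w, hwmem, ?_⟩
    rw [PySem.Str.isIn_iff_infix]
    have hwl : w.toList = (d.toList.drop i).take m := by rw [hw]; exact String.toList_ofList
    have hpre : w.toList <+: d.toList.drop i := by rw [hwl]; exact List.take_prefix _ _
    exact (PySem.Chars.isIn_iff_infix _ _).mp
      ((PySem.Chars.exists_prefix_drop_iff_isIn _ _).mp ⟨i, hpre⟩)

theorem filter_step4_series_description_spec : Claim_equal_filter_step4_series_description := by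
  intro ml _
  unfold Spec_filter_step4_series_description filter_step4_series_description filter_step4_series_description_alt
  have hfun : (fun (filtered : List (List (String × String))) entry =>
      let desc := PySem.Str.lower (PySem.Dict.getD (PySem.Dict.mk entry) "SeriesDescription" "")
      if pvSeriesDescExclusions.any (fun substr => PySem.Str.isIn substr desc) then filtered
      else filtered ++ [entry]) =
      (fun acc x => if (fun entry =>
        !pvExcluded (PySem.Str.lower (PySem.Dict.getD (PySem.Dict.mk entry) "SeriesDescription" ""))) x
        then acc ++ [id x] else acc) := by
    funext acc x
    simp only [pvScan_eq, id]
    cases pvExcluded (PySem.Str.lower (PySem.Dict.getD (PySem.Dict.mk x) "SeriesDescription" "")) <;> simp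
  rw [hfun, PySem.List.foldl_append_if]
  simp [List.map_id]
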